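-- pv_equiv track=rewrite | github.com/shavak/functional_equation_binary_grouping | fe_bingrp.py | fe_table
-- ===== SOURCE A (Python) =====
-- def fe_table(n):
--     f = {1 : 1}
--     for k in range(2, n + 1):
--         m = k // 2
--         r = k % 2
--         l = m % 2
--         f[k] = ((r ^ l) + 1) * f[m] + r * (1 - l)
--     return f
-- ===== SOURCE B (Python) =====
-- def fe_table(n):
--     # Compute each entry independently by recursive descent on k // 2
--     # (depth ~ log2 k), instead of reading earlier table entries.
--     def g(k):
--         if k <= 1:
--             return 1
--         m, r = divmod(k, 2)
--         l = m % 2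
--         return ((r ^ l) + 1) * g(m) + r * (1 - l)
--     return {k: g(k) for k in range(1, max(n, 1) + 1)}
-- ===== Notes on version B (the rewrite author's own statement) =====
-- stated objective: alternative
-- what changed: A fills the table bottom-up, each new entry reading the previously stored entry at the halved key from the growing dict; B computes every entry independently by a recursive descent on the halved key (logarithmic depth) and builds the table as a single dict comprehension.
import Mathlib
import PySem

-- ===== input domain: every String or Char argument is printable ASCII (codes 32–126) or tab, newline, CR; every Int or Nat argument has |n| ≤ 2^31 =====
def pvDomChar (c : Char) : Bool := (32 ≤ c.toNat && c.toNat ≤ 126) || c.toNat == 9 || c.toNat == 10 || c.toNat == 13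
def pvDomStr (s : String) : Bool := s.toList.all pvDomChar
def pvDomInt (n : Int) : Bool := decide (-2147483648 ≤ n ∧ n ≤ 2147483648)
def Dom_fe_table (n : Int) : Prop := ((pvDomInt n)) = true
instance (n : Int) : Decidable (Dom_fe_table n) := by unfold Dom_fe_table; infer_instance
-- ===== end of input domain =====

-- B replaces A's bottom-up table (each f[k] read from the growing dict) by an independent
-- recursive descent g(k) on k // 2 per key (objective: alternative decomposition, not faster).

-- ===== PORT A =====
def fe_table (n : Int) : List (Int × Int) :=
  -- f = {1: 1} is the foldl's initial accumulator
  ((PySem.List.pyRange 2 (n + 1) 1).foldl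
    (fun f k =>
      let m := PySem.Int.floordiv k 2
      let r := PySem.Int.mod k 2
      let l := PySem.Int.mod m 2
      -- f[m]: key m is always present here (1 ≤ m < k), so getD is exact for this lookup
      f.insert k (((Int.xor r l) + 1) * f.getD m 0 + r * (1 - l)))
    (PySem.Dict.ofList [(1, 1)])).items

-- ===== PORT B =====
-- helper g of Source B: recursive descent on k // 2
def fe_rec (k : Int) : Int :=
  if h : k ≤ 1 then 1
  else
    let m := PySem.Int.floordiv k 2
    let r := PySem.Int.mod k 2
    let l := PySem.Int.mod m 2
    ((Int.xor r l) + 1) * fe_rec m + r * (1 - l)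
termination_by k.toNat
decreasing_by
  rw [PySem.Int.floordiv_eq_ediv_of_pos (by norm_num)]
  omega

def fe_table_alt (n : Int) : List (Int × Int) :=
  -- the dict comprehension {k: g(k) for k in range(1, max(n,1)+1)} = sequential insertion
  ((PySem.List.pyRange 1 (max n 1 + 1) 1).foldl
    (fun d k => d.insert k (fe_rec k)) PySem.Dict.empty).items

-- ===== PRECONDITION & SPEC =====
def Spec_fe_table (n : Int) (out : List (Int × Int)) : Prop := out = fe_table_alt n
instance (n : Int) (out : List (Int × Int)) : Decidable (Spec_fe_table n out) := by unfold Spec_fe_table; infer_instance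

-- ===== CLAIM (what is proved, stated in full; the proofs are below) =====
def Claim_equal_fe_table : Prop := ∀ (n : Int), Dom_fe_table n → Spec_fe_table n (fe_table n)

-- ===== LEMMAS AND PROOFS =====

theorem fe_rec_one : fe_rec 1 = 1 := by
  rw [fe_rec]; simp

theorem fe_rec_of_ge_two (k : Int) (hk : 2 ≤ k) :
    fe_rec k =
      ((Int.xor (PySem.Int.mod k 2) (PySem.Int.mod (PySem.Int.floordiv k 2) 2)) + 1)
        * fe_rec (PySem.Int.floordiv k 2)
      + PySem.Int.mod k 2 * (1 - PySem.Int.mod (PySem.Int.floordiv k 2) 2) := by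
  rw [fe_rec]
  rw [dif_neg (by omega)]

-- the key map of B: entries (k, fe_rec k) for k in range(1, t+1)
theorem fe_main (t : Int) (ht : 1 ≤ t) :
    (PySem.List.pyRange 2 (t + 1) 1).foldl
      (fun f k =>
        let m := PySem.Int.floordiv k 2
        let r := PySem.Int.mod k 2
        let l := PySem.Int.mod m 2
        f.insert k (((Int.xor r l) + 1) * f.getD m 0 + r * (1 - l)))
      (PySem.Dict.ofList [(1, 1)])
    = PySem.Dict.mk ((PySem.List.pyRange 1 (t + 1) 1).map (fun k => (k, fe_rec k))) := by
  induction t, ht using Int.le_induction with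
  | base =>
      rw [PySem.List.pyRange_one_eq_nil (by norm_num)]
      rw [PySem.List.pyRange_one_singleton]
      simp only [List.foldl_nil, List.map_cons, List.map_nil, fe_rec_one]
      decide
  | succ t ht ih =>
      have h2 : (2 : Int) ≤ t + 1 := by omega
      rw [show t + 1 + 1 = (t + 1) + 1 from rfl,
          PySem.List.pyRange_one_succ_right h2, List.foldl_append, ih]
      rw [PySem.List.pyRange_one_succ_right (by omega : (1:Int) ≤ t + 1), List.map_append]
      simp only [List.foldl_cons, List.foldl_nil]
      set m : Int := PySem.Int.floordiv (t + 1) 2 with hm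
      have hmdiv : m = (t + 1) / 2 := by
        rw [hm, PySem.Int.floordiv_eq_ediv_of_pos (by norm_num)]
      have hm1 : 1 ≤ m := by omega
      have hmt : m < t + 1 := by omega
      have hkeys :
          (PySem.Dict.mk ((PySem.List.pyRange 1 (t + 1) 1).map (fun k => (k, fe_rec k)))).keys
            = PySem.List.pyRange 1 (t + 1) 1 := by
        simp only [PySem.Dict.keys, List.map_map]
        rw [show ((fun (x : Int × Int) => x.1) ∘ fun k => (k, fe_rec k)) = id from rfl, List.map_id]
      have hnodup :
          (PySem.Dict.mk ((PySem.List.pyRange 1 (t + 1) 1).map (fun k => (k, fe_rec k)))).keys.Nodup := by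
        rw [hkeys]; exact PySem.List.nodup_pyRange_one 1 (t + 1)
      have hmem : (m, fe_rec m)
          ∈ (PySem.Dict.mk ((PySem.List.pyRange 1 (t + 1) 1).map (fun k => (k, fe_rec k)))).items := by
        exact List.mem_map_of_mem ((PySem.List.mem_pyRange_one).2 ⟨hm1, hmt⟩)
      have hgetD :
          (PySem.Dict.mk ((PySem.List.pyRange 1 (t + 1) 1).map (fun k => (k, fe_rec k)))).getD m 0
            = fe_rec m := PySem.Dict.getD_of_mem_items _ hmem hnodup 0
      have hnc :
          (PySem.Dict.mk ((PySem.List.pyRange 1 (t + 1) 1).map (fun k => (k, fe_rec k)))).contains (t + 1)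
            = false := by
        rw [PySem.Dict.contains_eq_decide_mem_keys, hkeys]
        simp [PySem.List.mem_pyRange_one]
      apply PySem.Dict.ext
      rw [PySem.Dict.items_insert_of_not_contains _ _ hnc]
      simp only [hgetD, List.map_cons, List.map_nil]
      rw [fe_rec_of_ge_two (t + 1) h2, ← hm]

theorem fe_table_alt_items (n : Int) :
    fe_table_alt n
      = (PySem.List.pyRange 1 (max n 1 + 1) 1).map (fun k => (k, fe_rec k)) := by
  unfold fe_table_alt
  rw [PySem.Dict.items_foldl_insert_fresh (PySem.List.pyRange 1 (max n 1 + 1) 1)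
        (fun a => a) (fun a => fe_rec a) PySem.Dict.empty
        (fun a _ => PySem.Dict.contains_empty a)
        (by simpa using PySem.List.nodup_pyRange_one 1 (max n 1 + 1))]
  simp [PySem.Dict.empty]

-- ===== VERDICT (by name: the statement is the Claim_ definition above) =====
theorem fe_table_spec : Claim_equal_fe_table := by
  intro n _
  unfold Spec_fe_table
  rw [fe_table_alt_items]
  by_cases h : 1 ≤ n
  · have hmax : max n 1 = n := max_eq_left h
    unfold fe_table
    rw [fe_main n h, hmax]
  · have hmax : max n 1 = 1 := max_eq_right (by omega)
    unfold fe_table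
    rw [PySem.List.pyRange_one_eq_nil (by omega : n + 1 ≤ 2)]
    rw [hmax, PySem.List.pyRange_one_singleton]
    simp only [List.foldl_nil, List.map_cons, List.map_nil, fe_rec_one]
    decide
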